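-- pv_equiv track=rewrite | github.com/CompaoreYannDjamel/ReseauxI | Outils/Utilitaires.py | chaine_vers_binaire
-- ===== SOURCE A (Python) =====
-- def chaine_vers_binaire(chaine):
--     l, m = [], []
--     for i in chaine:
--         l.append(ord(i))
--     for i in l:
--         x = f"{int(bin(i)[2:])}"
--         for y in range(len(x), 8):
--             x = '0' + x
--         m.append(x)
--     return m
-- ===== SOURCE B (Python) =====
-- def chaine_vers_binaire(chaine):
--     m = []
--     for c in chaine:
--         o = ord(c)
--         x = ''
--         while o:
--             x = str(o & 1) + x
--             o >>= 1
--         if not x: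
--             x = '0'
--         m.append('0' * (8 - len(x)) + x)
--     return m
-- ===== Notes on version B (the rewrite author's own statement) =====
-- stated objective: alternative
-- what changed: Replaces A's bin()->strip-prefix->int()->str() string round-trip and its char-by-char padding loop with direct arithmetic bit extraction (o & 1, o >>= 1) and a single string-multiplication left pad to width 8.
import Mathlib
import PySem

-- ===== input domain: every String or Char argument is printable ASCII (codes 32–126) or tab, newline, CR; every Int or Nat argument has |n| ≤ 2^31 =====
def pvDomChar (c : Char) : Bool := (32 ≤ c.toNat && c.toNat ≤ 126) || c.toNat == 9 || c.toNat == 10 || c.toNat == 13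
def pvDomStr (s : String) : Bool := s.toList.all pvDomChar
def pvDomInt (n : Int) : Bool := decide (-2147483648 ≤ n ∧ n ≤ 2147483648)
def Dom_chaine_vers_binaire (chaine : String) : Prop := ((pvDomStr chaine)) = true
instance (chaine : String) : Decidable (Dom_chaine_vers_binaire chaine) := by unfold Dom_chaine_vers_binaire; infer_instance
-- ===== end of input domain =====

-- B replaces A's bin()->int()->str() string round-trip and per-char padding loop by
-- arithmetic bit extraction (o & 1, o >>= 1) and a single left-pad; alternative, not faster.

-- ===== PORT A =====
def chaine_vers_binaire (chaine : String) : List String :=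
  let l : List Int := chaine.toList.foldl (fun acc i => acc ++ [(i.toNat : Int)]) []
  l.foldl (fun m i =>
    -- x = f"{int(bin(i)[2:])}"  (int() never raises here: bin(i)[2:] of a nonneg ord is digits)
    let x : List Char :=
      PySem.Int.toChars ((PySem.Int.ofChars? (PySem.List.slice (PySem.Int.toBinChars0b i) (some 2) none)).getD 0)
    -- for y in range(len(x), 8): x = '0' + x
    let x := (PySem.List.pyRange (x.length : Int) 8 1).foldl (fun x _ => '0' :: x) x
    m ++ [String.ofList x]) []

-- ===== PORT B =====
-- while o: x = str(o & 1) + x; o >>= 1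
-- fuel only makes the 'while o:' loop structurally total; o itself bounds the iteration count
def pvBitsF : Nat → Nat → List Char → List Char
  | _, 0, acc => acc
  | 0, _+1, acc => acc   -- unreachable: fuel = o suffices since o >>> 1 < o
  | fuel+1, o+1, acc =>
      pvBitsF fuel ((o+1) >>> 1) (PySem.Int.toChars (PySem.Int.band ((o+1 : Nat) : Int) 1) ++ acc)

def pvBits (o : Nat) (acc : List Char) : List Char := pvBitsF o o acc

def chaine_vers_binaire_alt (chaine : String) : List String :=
  chaine.toList.foldl (fun m c =>
    let o := c.toNat
    let x := pvBits o []
    let x := if x = [] then ['0'] else x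
    m ++ [String.ofList (List.replicate (8 - x.length) '0' ++ x)]) []

-- ===== PRECONDITION & SPEC =====
def Spec_chaine_vers_binaire (chaine : String) (out : List String) : Prop := out = chaine_vers_binaire_alt chaine
instance (chaine : String) (out : List String) : Decidable (Spec_chaine_vers_binaire chaine out) := by unfold Spec_chaine_vers_binaire; infer_instance

-- ===== CLAIM (what is proved, stated in full; the proofs are below) =====
def Claim_equal_chaine_vers_binaire : Prop := ∀ (chaine : String), Dom_chaine_vers_binaire chaine → Spec_chaine_vers_binaire chaine (chaine_vers_binaire chaine)

-- ===== LEMMAS AND PROOFS =====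

-- per-char body of A's second loop
def pvA (i : Int) : List Char :=
  let x : List Char :=
    PySem.Int.toChars ((PySem.Int.ofChars? (PySem.List.slice (PySem.Int.toBinChars0b i) (some 2) none)).getD 0)
  (PySem.List.pyRange (x.length : Int) 8 1).foldl (fun x _ => '0' :: x) x

-- per-char body of B's loop
def pvB (o : Nat) : List Char :=
  let x := pvBits o []
  let x := if x = [] then ['0'] else x
  List.replicate (8 - x.length) '0' ++ x

lemma pvA_map (chaine : String) :
    chaine_vers_binaire chaine = chaine.toList.map (fun c => String.ofList (pvA ((c.toNat : Int)))) := by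
  show (chaine.toList.foldl (fun acc i => acc ++ [(i.toNat : Int)]) []).foldl
      (fun m i => m ++ [String.ofList (pvA i)]) [] = _
  rw [PySem.List.foldl_append_singleton_eq_map, PySem.List.foldl_append_singleton_eq_map]
  simp [List.map_map]

lemma pvB_map (chaine : String) :
    chaine_vers_binaire_alt chaine = chaine.toList.map (fun c => String.ofList (pvB c.toNat)) := by
  exact PySem.List.foldl_append_singleton_eq_map ..

set_option maxRecDepth 8192 in
lemma pv_char_eq : ∀ n < 127, pvA ((n : Nat) : Int) = pvB n := by decide

-- ===== VERDICT (by name: the statement is the Claim_ definition above) =====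
theorem chaine_vers_binaire_spec : Claim_equal_chaine_vers_binaire := by
  intro chaine hdom
  unfold Spec_chaine_vers_binaire
  rw [pvA_map, pvB_map]
  apply List.map_congr_left
  intro c hc
  have h : pvDomChar c = true := by
    have := List.all_eq_true.mp hdom c hc
    exact this
  have hn : c.toNat < 127 := by
    simp [pvDomChar] at h
    omega
  exact congrArg String.ofList (pv_char_eq c.toNat hn)
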